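-- pv_equiv track=rewrite | github.com/Im-younique/2021_Algorithm_and_learn_python | coding_test_kakao/recommandId.py | solution
-- ===== SOURCE A (Python) =====
-- def solution(new_id):
--     new_id = list(new_id.lower())
--     temp = []
--     for i in range(len(new_id)):
--         flag = True
--         if not(new_id[i].isdigit() or new_id[i].islower() or new_id[i] == '-' or new_id[i] == '_' or new_id[i] == '.'):
--             flag = False
--         if len(temp) != 0 and temp[len(temp)-1] == "." and new_id[i] == ".":
--             flag = False
--         if flag:
--             temp.append(new_id[i])
--
--     while len(temp) != 0 and (temp[0] == "." or temp[len(temp)-1] == "."):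
--         if temp[0] == ".":
--             temp = temp[1:]
--         else:
--             temp = temp[0:len(temp)-1]
--
--     #new_id = "".join(temp)
--     new_id = temp
--     if len(new_id) == 0:
--         new_id.append("a")
--     elif len(new_id) >= 16:
--         new_id = new_id[0:15]
--         for j in range(len(new_id)-1, 0, -1):
--             if new_id[j] == ".":
--                 new_id = new_id[0:j]
--             else:
--                 break
--
--     if len(new_id) <= 2:
--         alpha = new_id[len(new_id)-1]
--         while len(new_id) < 3:
--             new_id.append(alpha)
--
--     answer = "".join(new_id)
--     return answer
-- ===== SOURCE B (Python) =====
-- def solution(new_id):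
--     kept = [c for c in new_id.lower() if c.isalnum() or c in "-_."]
--     s = ".".join(p for p in "".join(kept).split(".") if p)
--     if not s:
--         s = "a"
--     elif len(s) >= 16:
--         s = s[:15].rstrip(".")
--     if len(s) <= 2:
--         s += s[-1] * (3 - len(s))
--     return s
-- ===== Notes on version B (the rewrite author's own statement) =====
-- stated objective: idiomatic
-- what changed: Replaces A's stateful filter loop (tracking the last kept char), slice-based two-end dot-stripping while-loop, backwards truncation-trim index loop and padding while-loop with the idiomatic string-method chain: filter comprehension, then one split/join pass that collapses dot runs and strips both ends at once, rstrip after truncation, and arithmetic padding from the last character.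
import Mathlib
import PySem

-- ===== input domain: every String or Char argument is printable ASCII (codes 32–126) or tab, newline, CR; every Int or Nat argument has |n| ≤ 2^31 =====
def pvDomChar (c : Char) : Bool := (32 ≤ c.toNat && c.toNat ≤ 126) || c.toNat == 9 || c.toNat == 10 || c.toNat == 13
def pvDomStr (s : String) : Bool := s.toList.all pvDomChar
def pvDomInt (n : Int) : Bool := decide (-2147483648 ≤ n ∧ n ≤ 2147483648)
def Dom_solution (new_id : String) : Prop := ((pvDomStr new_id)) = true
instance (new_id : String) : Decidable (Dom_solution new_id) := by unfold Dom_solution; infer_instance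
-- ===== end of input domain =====

-- B replaces A's stateful filter/strip/trim/pad loops with the idiomatic split/join + rstrip + arithmetic-padding chain (objective: idiomatic).


-- ===== PORT A =====
-- loop body of A's filtering 'for i in range(len(new_id))' loop
def aStep (temp : List Char) (c : Char) : List Char :=
  let flag := true
  let flag := if !(PySem.Chars.isdigit c || PySem.Chars.islower c || c == '-' || c == '_' || c == '.') then false else flag
  let flag := if (temp.length != 0) && (PySem.List.pyGetD temp ((temp.length : Int) - 1) ' ' == '.') && (c == '.') then false else flag
  if flag then temp ++ [c] else temp

-- A's 'while len(temp) != 0 and (temp[0] == "." or temp[-1] == ".")' loop; fuel = initial length (each pass drops one char)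
def aStrip (fuel : Nat) (temp : List Char) : List Char :=
  match fuel with
  | 0 => temp
  | fuel + 1 =>
    if (temp.length != 0) && ((PySem.List.pyGetD temp 0 ' ' == '.') || (PySem.List.pyGetD temp ((temp.length : Int) - 1) ' ' == '.')) then
      if PySem.List.pyGetD temp 0 ' ' == '.' then aStrip fuel (PySem.List.slice temp (some 1) none)
      else aStrip fuel (PySem.List.slice temp (some 0) (some ((temp.length : Int) - 1)))
    else temp

-- A's 'for j in range(len(new_id)-1, 0, -1)' truncation-trim loop (break = return)
def trimA (xs : List Char) (j : Nat) : List Char :=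
  match j with
  | 0 => xs
  | j + 1 =>
    if PySem.List.pyGetD xs ((j + 1 : Nat) : Int) ' ' == '.' then
      trimA (PySem.List.slice xs (some 0) (some ((j + 1 : Nat) : Int))) j
    else xs

-- A's 'while len(new_id) < 3: new_id.append(alpha)' loop; fuel 3 suffices (each pass adds one char towards length 3)
def padA (xs : List Char) (alpha : Char) (fuel : Nat) : List Char :=
  match fuel with
  | 0 => xs
  | fuel + 1 => if xs.length < 3 then padA (xs ++ [alpha]) alpha fuel else xs

def solution (new_id : String) : String :=
  let low := PySem.Chars.lower new_id.toList
  let temp := (PySem.List.pyRange 0 (PySem.List.len low)).foldl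
    (fun t i => aStep t (PySem.List.pyGetD low i ' ')) []
  let temp := aStrip temp.length temp
  let nid :=
    if temp.length = 0 then temp ++ ['a']
    else if 16 ≤ temp.length then
      trimA (PySem.List.slice temp (some 0) (some 15)) ((PySem.List.slice temp (some 0) (some 15)).length - 1)
    else temp
  -- alpha = new_id[len(new_id)-1]; the list is never empty here, so the pyGetD default is never read
  let nid := if nid.length ≤ 2 then padA nid (PySem.List.pyGetD nid ((nid.length : Int) - 1) 'a') 3 else nid
  String.ofList nid

-- ===== PORT B =====
-- hand port of s.rstrip(".") : drop the trailing '.' characters (exact)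
def rstripDot (xs : List Char) : List Char := (xs.reverse.dropWhile (· == '.')).reverse

def solution_alt (new_id : String) : String :=
  let kept := (PySem.Chars.lower new_id.toList).filter
    (fun c => PySem.Chars.isalnum c || ['-', '_', '.'].contains c)
  let s := PySem.Chars.join ['.'] ((PySem.Chars.splitOn kept ['.']).filter (fun p => !p.isEmpty))
  let s :=
    if s.isEmpty then ['a']
    else if 16 ≤ s.length then rstripDot (PySem.List.slice s none (some 15))
    else s
  -- s[-1] : the list is never empty here, so the pyGetD default is never read
  let s := if s.length ≤ 2 then s ++ PySem.List.pyRepeat [PySem.List.pyGetD s (-1) 'a'] (3 - (s.length : Int)) else s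
  String.ofList s

-- ===== PRECONDITION & SPEC =====
def Spec_solution (new_id : String) (out : String) : Prop := out = solution_alt new_id
instance (new_id : String) (out : String) : Decidable (Spec_solution new_id out) := by unfold Spec_solution; infer_instance

-- ===== CLAIM (what is proved, stated in full; the proofs are below) =====
def Claim_equal_solution : Prop := ∀ (new_id : String), Dom_solution new_id → Spec_solution new_id (solution new_id)

-- ===== LEMMAS AND PROOFS =====

-- A's keep-this-character test
def predA (c : Char) : Bool :=
  PySem.Chars.isdigit c || PySem.Chars.islower c || c == '-' || c == '_' || c == '.'

-- collapse consecutive dots; the flag records whether the previously kept char was a dot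
def dd (b : Bool) : List Char → List Char
  | [] => []
  | c :: t => if c == '.' then (if b then dd b t else '.' :: dd true t) else c :: dd false t

-- split at dots, with the current (already read) segment as accumulator
def mySplit (pre : List Char) : List Char → List (List Char)
  | [] => [pre]
  | c :: t => if c == '.' then pre :: mySplit [] t else mySplit (pre ++ [c]) t

def lstripDot (xs : List Char) : List Char := xs.dropWhile (· == '.')

theorem pyGetD_last (xs : List Char) (d : Char) :
    PySem.List.pyGetD xs ((xs.length : Int) - 1) d = (xs.getLast?).getD d := by
  cases xs with
  | nil => simp [PySem.List.pyGetD, PySem.List.pyGet?, PySem.List.pyIdx?]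
  | cons x t =>
    have h : ((((x :: t).length : Int)) - 1) = (((x :: t).length - 1 : Nat) : Int) := by simp
    rw [h, PySem.List.pyGetD_natCast, List.getLast?_eq_getElem?]
    simp [List.getD]

theorem pyGetD_neg_one' (xs : List Char) (d : Char) :
    PySem.List.pyGetD xs (-1) d = (xs.getLast?).getD d := by
  cases xs with
  | nil => simp [PySem.List.pyGetD, PySem.List.pyGet?, PySem.List.pyIdx?]
  | cons x t =>
    rw [PySem.List.pyGetD_neg_one _ _ (by simp)]
    rw [List.getLast?_eq_some_getLast (by simp)]
    rfl

theorem lastDot_eq (temp : List Char) :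
    ((temp.length != 0) && (PySem.List.pyGetD temp ((temp.length : Int) - 1) ' ' == '.')) =
      (temp.getLast? == some '.') := by
  cases temp with
  | nil => simp [PySem.List.pyGetD, PySem.List.pyGet?, PySem.List.pyIdx?]
  | cons x t =>
    rw [pyGetD_last, List.getLast?_eq_some_getLast (by simp)]
    simp

theorem aStep_eq (temp : List Char) (c : Char) :
    aStep temp c =
      if predA c && !((temp.getLast? == some '.') && (c == '.')) then temp ++ [c] else temp := by
  unfold aStep
  rw [Bool.and_assoc, ← Bool.and_assoc (temp.length != 0), lastDot_eq]
  by_cases hp : predA c = true <;> by_cases hd : ((temp.getLast? == some '.') && (c == '.')) = true <;>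
    simp [predA] at hp hd ⊢ <;> simp [hp, hd]

theorem fold_eq_dd (cs : List Char) (temp : List Char) :
    cs.foldl aStep temp = temp ++ dd (temp.getLast? == some '.') (cs.filter predA) := by
  induction cs generalizing temp with
  | nil => simp [dd]
  | cons c t IH =>
    rw [List.foldl_cons, aStep_eq, List.filter_cons]
    by_cases hp : predA c = true
    · by_cases hc : c = '.'
      · subst hc
        by_cases hl : temp.getLast? = some '.'
        · simp [IH, hp, hl, dd]
        · simp [IH, hp, hl, dd, List.append_assoc]
      · have hc' : (c == '.') = false := by simpa using hc
        simp [IH, hp, dd, List.append_assoc, hc']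
    · have hp' : predA c = false := by simpa using hp
      simp [IH, hp']

theorem rstripDot_no_dot (xs : List Char) (h : xs.getLast? ≠ some '.') : rstripDot xs = xs := by
  unfold rstripDot
  cases hr : xs.reverse with
  | nil => simp at hr; simp [hr]
  | cons a r =>
    have ha : xs.getLast? = some a := by
      rw [List.getLast?_eq_head?_reverse, hr]; rfl
    have : (a == '.') = false := by
      rw [ha] at h; simpa using fun e => h (by rw [e])
    rw [List.dropWhile_cons_of_neg (by simp [this]), ← hr, List.reverse_reverse]

theorem rstripDot_last_dot (xs : List Char) (h : xs.getLast? = some '.') :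
    rstripDot xs = rstripDot xs.dropLast := by
  unfold rstripDot
  cases hr : xs.reverse with
  | nil => simp at hr; subst hr; simp at h
  | cons a r =>
    have ha : xs.getLast? = some a := by rw [List.getLast?_eq_head?_reverse, hr]; rfl
    have haa : a = '.' := by rw [ha] at h; injection h
    have hx : xs = r.reverse ++ [a] := by
      rw [← List.reverse_reverse xs, hr]; simp
    rw [List.dropWhile_cons_of_pos (by simp [haa])]
    rw [hx, List.dropLast_concat, List.reverse_reverse]

theorem rstripDot_append (u v : List Char) :
    rstripDot (u ++ v) = if rstripDot v = [] then rstripDot u else u ++ rstripDot v := by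
  unfold rstripDot
  rw [List.reverse_append, List.dropWhile_append]
  by_cases he : List.dropWhile (· == '.') v.reverse = []
  · rw [if_pos (by simp [he]), if_pos (by simp [he])]
  · rw [if_neg (by simp [List.isEmpty_iff, he]), if_neg (by simp [he])]
    simp

theorem rstripDot_of_all_ne (pre : List Char) (hpre : ∀ c ∈ pre, c ≠ '.') :
    rstripDot pre = pre := by
  apply rstripDot_no_dot
  cases hl : pre.getLast? with
  | none => simp
  | some v =>
    have : v ∈ pre := List.mem_of_getLast? hl
    simpa using fun e => hpre v this (by rw [e])

theorem rstripDot_prefix (xs : List Char) : rstripDot xs <+: xs := by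
  have h : List.dropWhile (· == '.') xs.reverse <:+ xs.reverse := List.dropWhile_suffix _
  have h2 := List.reverse_prefix.mpr h
  simpa [rstripDot] using h2

theorem lstrip_no (x : Char) (t : List Char) (hx : x ≠ '.') : lstripDot (x :: t) = x :: t := by
  unfold lstripDot
  rw [List.dropWhile_cons_of_neg (by simpa using hx)]

theorem aStrip_eq (n : Nat) (temp : List Char) (h : temp.length ≤ n) :
    aStrip n temp = rstripDot (lstripDot temp) := by
  induction n generalizing temp with
  | zero =>
    have : temp = [] := by simpa using List.length_eq_zero_iff.mp (Nat.le_zero.mp h)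
    subst this; rfl
  | succ n IH =>
    cases temp with
    | nil => simp [aStrip, lstripDot, rstripDot]
    | cons x t =>
      by_cases hx : x = '.'
      · subst hx
        have hc : (PySem.List.pyGetD ('.' :: t) 0 ' ' == '.') = true := by
          simp [PySem.List.pyGetD_zero_cons]
        unfold aStrip
        rw [if_pos (by simp), if_pos hc, PySem.List.slice_from_one]
        have : lstripDot ('.' :: t) = lstripDot t := by
          unfold lstripDot; rw [List.dropWhile_cons_of_pos (by simp)]
        rw [this, List.tail_cons]
        exact IH t (by simpa using Nat.le_of_succ_le_succ h)
      · have hc : (PySem.List.pyGetD (x :: t) 0 ' ' == '.') = false := by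
          simp [PySem.List.pyGetD_zero_cons, hx]
        rw [lstrip_no x t hx]
        by_cases hl : (x :: t).getLast? = some '.'
        · unfold aStrip
          rw [if_pos (by rw [pyGetD_last, hl]; simp), if_neg (by simp [PySem.List.pyGetD_zero_cons, hx])]
          have hslice : PySem.List.slice (x :: t) (some 0) (some (((x :: t).length : Int) - 1)) = (x :: t).dropLast := by
            rw [PySem.List.slice_toNat _ (by norm_num) (by simp)]
            simp [List.dropLast_eq_take]
          rw [hslice]
          have ht : t ≠ [] := by
            intro e; subst e
            simp at hl; exact hx hl
          have hdl : (x :: t).dropLast = x :: t.dropLast := by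
            cases t with
            | nil => exact absurd rfl ht
            | cons y s => rfl
          rw [IH _ (by simp [hdl]; have := List.length_pos_iff.mpr ht; simp at h ⊢; omega)]
          rw [hdl, lstrip_no x _ hx, ← hdl, ← rstripDot_last_dot _ hl]
        · unfold aStrip
          rw [if_neg]
          · exact (rstripDot_no_dot _ hl).symm
          · rw [pyGetD_last]
            cases hgl : (x :: t).getLast? with
            | none => simp at hgl
            | some v =>
              have hv : v ≠ '.' := fun e => hl (by rw [hgl, e])
              simp [PySem.List.pyGetD_zero_cons, hx, hv]

theorem lstripDot_dd (l : List Char) (b : Bool) : lstripDot (dd b l) = dd true l := by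
  induction l generalizing b with
  | nil => rfl
  | cons c t IH =>
    by_cases hc : c = '.'
    · subst hc
      have hr : dd true ('.' :: t) = dd true t := by simp [dd]
      cases b with
      | true => rw [hr, IH true]
      | false =>
        have hl : dd false ('.' :: t) = '.' :: dd true t := by simp [dd]
        rw [hl, hr]
        unfold lstripDot
        rw [List.dropWhile_cons_of_pos (by simp)]
        exact IH true
    · have hc' : (c == '.') = false := by simpa using hc
      simp only [dd, hc', Bool.false_eq_true, if_false]
      unfold lstripDot
      rw [List.dropWhile_cons_of_neg (by simp [hc])]

theorem dd_true_head (l : List Char) : (dd true l).head? ≠ some '.' := by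
  induction l with
  | nil => simp [dd]
  | cons c t IH =>
    by_cases hc : c = '.'
    · subst hc
      have hr : dd true ('.' :: t) = dd true t := by simp [dd]
      rw [hr]; exact IH
    · have hc' : (c == '.') = false := by simpa using hc
      simp only [dd, hc', Bool.false_eq_true, if_false]
      simp [hc]

theorem splitOn_go_eq (fuel : Nat) (l cur : List Char) (acc : List (List Char))
    (h : l.length < fuel) :
    PySem.Chars.splitOn.go ['.'] fuel l cur acc = acc.reverse ++ mySplit cur.reverse l := by
  induction fuel generalizing l cur acc with
  | zero => omega
  | succ fuel IH =>
    cases l with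
    | nil =>
      show (cur.reverse :: acc).reverse = _
      simp [mySplit]
    | cons c rest =>
      show (if ['.'].isPrefixOf (c :: rest) then
          PySem.Chars.splitOn.go ['.'] fuel (List.drop ['.'].length (c :: rest)) [] (cur.reverse :: acc)
        else PySem.Chars.splitOn.go ['.'] fuel rest (c :: cur) acc) = _
      by_cases hc : c = '.'
      · subst hc
        rw [if_pos (by simp [List.isPrefixOf])]
        rw [IH _ _ _ (by simpa using Nat.lt_of_succ_lt_succ h)]
        simp [mySplit]
      · rw [if_neg (by simp [List.isPrefixOf]; exact fun e => hc e.symm)]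
        rw [IH _ _ _ (by simpa using Nat.lt_of_succ_lt_succ h)]
        simp [mySplit, hc]

theorem join_ne_nil (f : List Char) (fs : List (List Char)) (hf : f ≠ []) :
    PySem.Chars.join ['.'] (f :: fs) ≠ [] := by
  cases fs with
  | nil => rw [PySem.Chars.join_singleton]; exact hf
  | cons g gs =>
    rw [PySem.Chars.join_cons_cons]
    simp [hf]

theorem join_split_eq (l : List Char) (pre : List Char) (hpre : ∀ c ∈ pre, c ≠ '.') :
    PySem.Chars.join ['.'] ((mySplit pre l).filter (fun p => !p.isEmpty)) =
      rstripDot (pre ++ dd pre.isEmpty l) := by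
  induction l generalizing pre with
  | nil =>
    cases pre with
    | nil => simp [mySplit, dd, PySem.Chars.join_nil, rstripDot]
    | cons p ps =>
      simp only [mySplit, dd, List.append_nil]
      rw [List.filter_cons_of_pos (by simp), List.filter_nil, PySem.Chars.join_singleton]
      exact (rstripDot_of_all_ne _ hpre).symm
  | cons c t IH =>
    by_cases hc : c = '.'
    · subst hc
      have hsp : mySplit pre ('.' :: t) = pre :: mySplit [] t := by simp [mySplit]
      rw [hsp, List.filter_cons]
      cases pre with
      | nil =>
        simp only [List.isEmpty_nil, Bool.not_true, Bool.false_eq_true, if_false]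
        rw [IH [] (by simp)]
        have : dd true ('.' :: t) = dd true t := by simp [dd]
        simp [this]
      | cons p ps =>
        rw [if_pos (by simp)]
        have hdd : dd (p :: ps).isEmpty ('.' :: t) = '.' :: dd true t := by simp [dd]
        rw [hdd]
        have hIH := IH [] (by simp)
        simp only [List.isEmpty_nil, List.nil_append] at hIH
        rw [show (p :: ps) ++ '.' :: dd true t = ((p :: ps) ++ ['.']) ++ dd true t by simp]
        rw [rstripDot_append]
        have hmid : rstripDot ((p :: ps) ++ ['.']) = p :: ps := by
          rw [rstripDot_append]
          rw [if_pos (by simp [rstripDot])]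
          exact rstripDot_of_all_ne _ hpre
        cases hF : (mySplit [] t).filter (fun p => !p.isEmpty) with
        | nil =>
          rw [hF, PySem.Chars.join_nil] at hIH
          rw [if_pos hIH.symm, hmid, PySem.Chars.join_singleton]
        | cons f fs =>
          have hfne : f ≠ [] := by
            have : f ∈ (mySplit [] t).filter (fun p => !p.isEmpty) := by rw [hF]; exact List.mem_cons_self
            have := List.of_mem_filter this
            simpa [List.isEmpty_iff] using this
          rw [hF] at hIH
          rw [if_neg (by rw [← hIH]; exact join_ne_nil f fs hfne)]
          rw [PySem.Chars.join_cons_cons, ← hIH]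
    · have hsp : mySplit pre (c :: t) = mySplit (pre ++ [c]) t := by simp [mySplit, hc]
      have hdd : dd pre.isEmpty (c :: t) = c :: dd false t := by simp [dd, hc]
      rw [hsp, hdd]
      have hIH := IH (pre ++ [c]) (by
        intro x hx
        rcases List.mem_append.mp hx with h | h
        · exact hpre x h
        · simpa using fun e => hc (by simp at h; rw [← h]; exact e))
      have : (pre ++ [c]).isEmpty = false := by simp
      rw [this] at hIH
      rw [hIH]
      simp

theorem trimA_eq (n : Nat) (xs : List Char) (hn : xs.length = n) (h : xs.head? ≠ some '.') :
    trimA xs (xs.length - 1) = rstripDot xs := by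
  induction n generalizing xs with
  | zero =>
    have : xs = [] := List.length_eq_zero_iff.mp hn
    subst this; simp [trimA, rstripDot]
  | succ n IH =>
    rcases xs with _ | ⟨x, t⟩
    · simp at hn
    rcases t.eq_nil_or_concat with rfl | ⟨ys, a, rfl⟩
    · show trimA [x] 0 = rstripDot [x]
      have hx : x ≠ '.' := by simpa using h
      rw [rstripDot_no_dot _ (by simpa using hx)]
      rfl
    · simp only [List.concat_eq_append] at hn h ⊢
      have hlen : (x :: (ys ++ [a])).length - 1 = ys.length + 1 := by simp
      rw [hlen]
      show (if PySem.List.pyGetD (x :: (ys ++ [a])) ((ys.length + 1 : Nat) : Int) ' ' == '.' then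
          trimA (PySem.List.slice (x :: (ys ++ [a])) (some 0) (some ((ys.length + 1 : Nat) : Int))) ys.length
        else x :: (ys ++ [a])) = rstripDot (x :: (ys ++ [a]))
      have hidx : PySem.List.pyGetD (x :: (ys ++ [a])) ((ys.length + 1 : Nat) : Int) ' ' = a := by
        rw [PySem.List.pyGetD_natCast]
        rw [show x :: (ys ++ [a]) = (x :: ys) ++ [a] by simp]
        simp [List.getD]
      rw [hidx]
      by_cases ha : a = '.'
      · rw [if_pos (by simp [ha])]
        have hslice : PySem.List.slice (x :: (ys ++ [a])) (some 0) (some ((ys.length + 1 : Nat) : Int)) = x :: ys := by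
          rw [PySem.List.slice_toNat _ (by norm_num) (by positivity)]
          simp
        rw [hslice]
        have hys : ys.length = (x :: ys).length - 1 := by simp
        rw [hys, IH (x :: ys) (by simp at hn ⊢; omega) (by simpa using h)]
        have hlast : (x :: (ys ++ [a])).getLast? = some '.' := by
          rw [show x :: (ys ++ [a]) = (x :: ys) ++ [a] from by simp, List.getLast?_concat, ha]
        rw [rstripDot_last_dot _ hlast, show x :: (ys ++ [a]) = (x :: ys) ++ [a] from by simp,
          List.dropLast_concat]
      · rw [if_neg (by simp [ha])]
        rw [rstripDot_no_dot]
        rw [show x :: (ys ++ [a]) = (x :: ys) ++ [a] by simp, List.getLast?_concat]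
        simpa using ha

theorem padA_eq (fuel : Nat) (xs : List Char) (a : Char) (h : 3 ≤ xs.length + fuel) :
    padA xs a fuel = xs ++ List.replicate (3 - xs.length) a := by
  induction fuel generalizing xs with
  | zero =>
    have : 3 - xs.length = 0 := by omega
    simp [padA, this]
  | succ fuel IH =>
    show (if xs.length < 3 then padA (xs ++ [a]) a fuel else xs) = _
    by_cases hlt : xs.length < 3
    · rw [if_pos hlt, IH _ (by simp; omega)]
      have h1 : 3 - (xs ++ [a]).length = (3 - xs.length) - 1 := by simp; omega
      have h2 : 3 - xs.length = ((3 - xs.length) - 1) + 1 := by omega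
      rw [h1, List.append_assoc, h2]
      simp [List.replicate_succ]
    · rw [if_neg hlt]
      have : 3 - xs.length = 0 := by omega
      simp [this]

theorem isupper_lowerChar (c : Char) : PySem.Chars.isupper (PySem.Chars.lowerChar c) = false := by
  unfold PySem.Chars.lowerChar
  by_cases h : PySem.Chars.isupper c = true
  · rw [if_pos h]
    unfold PySem.Chars.isupper at h ⊢
    simp only [Bool.and_eq_true, decide_eq_true_eq] at h
    obtain ⟨h1, h2⟩ := h
    have hA : ('A' : Char).toNat = 65 := by decide
    have hZ : ('Z' : Char).toNat = 90 := by decide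
    have hc1 : 65 ≤ c.toNat := by
      have := Char.le_def.mp h1
      simpa [hA] using this
    have hc2 : c.toNat ≤ 90 := by
      have := Char.le_def.mp h2
      simpa [hZ] using this
    have hv : (c.toNat + 32).isValidChar := by
      left
      omega
    have ht : (Char.ofNat (c.toNat + 32)).toNat = c.toNat + 32 := by
      rw [Char.toNat_ofNat, if_pos hv]
    simp only [Bool.and_eq_false_iff, decide_eq_false_iff_not]
    right
    intro hle
    have h3 : (Char.ofNat (c.toNat + 32)).toNat ≤ 'Z'.toNat :=
      UInt32.le_iff_toNat_le.mp (Char.le_def.mp hle)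
    rw [ht, hZ] at h3
    omega
  · rw [if_neg h]
    simpa using h

theorem predB_eq (c : Char) :
    (PySem.Chars.isalnum (PySem.Chars.lowerChar c) || ['-', '_', '.'].contains (PySem.Chars.lowerChar c)) =
      predA (PySem.Chars.lowerChar c) := by
  have hu := isupper_lowerChar c
  unfold PySem.Chars.isalnum PySem.Chars.isalpha predA
  rw [hu]
  simp only [List.contains_cons, List.contains_nil, Bool.or_false, Bool.false_or]
  cases PySem.Chars.isdigit (PySem.Chars.lowerChar c) <;>
    cases PySem.Chars.islower (PySem.Chars.lowerChar c) <;>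
      cases PySem.Chars.lowerChar c == '-' <;>
        cases PySem.Chars.lowerChar c == '_' <;>
          cases PySem.Chars.lowerChar c == '.' <;>
            simp

theorem pad_eq (xs : List Char) :
    String.ofList (if xs.length ≤ 2 then padA xs (PySem.List.pyGetD xs ((xs.length : Int) - 1) 'a') 3 else xs) =
      String.ofList (if xs.length ≤ 2 then xs ++ PySem.List.pyRepeat [PySem.List.pyGetD xs (-1) 'a'] (3 - (xs.length : Int)) else xs) := by
  by_cases h : xs.length ≤ 2
  · rw [if_pos h, if_pos h]
    rw [padA_eq 3 _ _ (by omega), pyGetD_last, pyGetD_neg_one', PySem.List.pyRepeat_singleton]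
    have : ((3 : Int) - xs.length).toNat = 3 - xs.length := by omega
    rw [this]
  · rw [if_neg h, if_neg h]

-- ===== VERDICT (by name: the statement is the Claim_ definition above) =====
theorem solution_spec : Claim_equal_solution := by
  intro new_id _
  unfold Spec_solution solution solution_alt
  dsimp only
  rw [PySem.List.foldl_pyRange_zero_pyGetD, fold_eq_dd]
  simp only [List.getLast?_nil, List.nil_append]
  have hfilter : (PySem.Chars.lower new_id.toList).filter
      (fun c => PySem.Chars.isalnum c || ['-', '_', '.'].contains c) =
        (PySem.Chars.lower new_id.toList).filter predA := by
    apply List.filter_congr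
    intro x hx
    obtain ⟨y, _, rfl⟩ := List.mem_map.mp (by simpa [PySem.Chars.lower] using hx)
    exact predB_eq y
  rw [hfilter]
  set l := (PySem.Chars.lower new_id.toList).filter predA with hl
  have hsplit : PySem.Chars.splitOn l ['.'] = mySplit [] l := by
    unfold PySem.Chars.splitOn
    rw [splitOn_go_eq _ _ _ _ (by omega)]
    simp
  rw [hsplit, join_split_eq l [] (by simp)]
  simp only [List.isEmpty_nil, List.nil_append]
  rw [aStrip_eq _ _ le_rfl, lstripDot_dd]
  set s0 := rstripDot (dd true l) with hs0
  by_cases h0 : s0 = []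
  · rw [h0]
    rfl
  · have h0' : s0.isEmpty = false := by simpa [List.isEmpty_iff] using h0
    have h0len : ¬ s0.length = 0 := by simpa [List.length_eq_zero_iff] using h0
    rw [if_neg h0len, if_neg (show ¬ s0.isEmpty = true by simp [h0'])]
    by_cases h16 : 16 ≤ s0.length
    · rw [if_pos h16, if_pos h16]
      have e1 : PySem.List.slice s0 (some 0) (some 15) = s0.take 15 := by
        rw [PySem.List.slice_toNat _ (by norm_num) (by norm_num)]
        simp
      have e2 : PySem.List.slice s0 none (some 15) = s0.take 15 := by
        rw [PySem.List.slice_to _ (by norm_num)]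
        simp
      rw [e1, e2]
      have hhead : s0.head? ≠ some '.' := by
        obtain ⟨tl, htl⟩ := rstripDot_prefix (dd true l)
        have hd := dd_true_head l
        rw [← htl, ← hs0] at hd
        cases hs : s0 with
        | nil => exact absurd hs h0
        | cons b bs =>
          rw [hs] at hd
          simpa using hd
      have hh15 : (s0.take 15).head? ≠ some '.' := by
        cases hcase : s0 with
        | nil => simp
        | cons b bs =>
          rw [hcase] at hhead
          simpa using hhead
      rw [trimA_eq ((s0.take 15).length) _ rfl hh15]
      exact pad_eq _
    · rw [if_neg h16, if_neg h16]
      exact pad_eq _
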